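-- pv_equiv track=rewrite | github.com/kauverysreerajendran/TTT-March2026 | BrassAudit/views-feb4.py | get_reusable_trays_after_rejection
-- ===== SOURCE A (Python) =====
-- def get_reusable_trays_after_rejection(tray_quantities, rejection_quantities):
--     """
--     Given a list of tray quantities and a list of progressive rejection quantities,
--     returns the indices of trays that become zero and can be reused for rejection.
--
--     Args:
--         tray_quantities: List[int] - initial tray quantities (e.g. [6, 16, 16, 16])
--         rejection_quantities: List[int] - progressive rejection quantities (e.g. [5, 6])
--
--     Returns:
--         reusable_tray_indices: List[int] - indices of trays that become zero after rejections
--         final_tray_quantities: List[int] - tray quantities after all rejections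
--     """
--     trays = tray_quantities.copy()
--     reusable_tray_indices = []
--
--     for reject_qty in rejection_quantities:
--         # Always consume from the smallest non-zero tray first (ascending order)
--         sorted_indices = sorted([i for i, qty in enumerate(trays) if qty > 0], key=lambda i: trays[i])
--         remaining = reject_qty
--         for idx in sorted_indices:
--             if remaining <= 0:
--                 break
--             consume = min(trays[idx], remaining)
--             trays[idx] -= consume
--             remaining -= consume
--             # If this tray just became zero, mark it as reusable (if not already marked)
--             if trays[idx] == 0 and idx not in reusable_tray_indices:
--                 reusable_tray_indices.append(idx)
--         # If rejection qty not fully consumed, break (should not happen if logic is correct)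
--
--     return reusable_tray_indices, trays
-- ===== SOURCE B (Python) =====
-- def get_reusable_trays_after_rejection(tray_quantities, rejection_quantities):
--     # One global pass instead of re-sorting per rejection: the total positive
--     # rejection demand (capped by the available positive stock) zeroes a prefix
--     # of the trays sorted once by quantity (ties by index), and at most one
--     # further tray is partially consumed.
--     trays = tray_quantities.copy()
--     available = sum(q for q in trays if q > 0)
--     demand = sum(r for r in rejection_quantities if r > 0)
--     total = min(demand, available)
--     order = sorted((i for i, q in enumerate(trays) if q > 0), key=lambda i: trays[i])
--     # longest prefix of `order` whose quantities fit inside `total`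
--     k = 0
--     acc = 0
--     while k < len(order) and acc + trays[order[k]] <= total:
--         acc += trays[order[k]]
--         k += 1
--     reusable_tray_indices = order[:k]
--     for i in reusable_tray_indices:
--         trays[i] = 0
--     if k < len(order):
--         trays[order[k]] -= total - acc
--     return reusable_tray_indices, trays
-- ===== Notes on version B (the rewrite author's own statement) =====
-- stated objective: faster
-- what changed: A re-sorts the live trays and re-walks them for every rejection; B sums the positive rejections once, caps that demand by the available positive stock, sorts the tray indices once, and zeroes the longest prefix of that order fitting the capped total (one partial subtraction), so the per-rejection loop and its repeated sorts disappear.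
import Mathlib
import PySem

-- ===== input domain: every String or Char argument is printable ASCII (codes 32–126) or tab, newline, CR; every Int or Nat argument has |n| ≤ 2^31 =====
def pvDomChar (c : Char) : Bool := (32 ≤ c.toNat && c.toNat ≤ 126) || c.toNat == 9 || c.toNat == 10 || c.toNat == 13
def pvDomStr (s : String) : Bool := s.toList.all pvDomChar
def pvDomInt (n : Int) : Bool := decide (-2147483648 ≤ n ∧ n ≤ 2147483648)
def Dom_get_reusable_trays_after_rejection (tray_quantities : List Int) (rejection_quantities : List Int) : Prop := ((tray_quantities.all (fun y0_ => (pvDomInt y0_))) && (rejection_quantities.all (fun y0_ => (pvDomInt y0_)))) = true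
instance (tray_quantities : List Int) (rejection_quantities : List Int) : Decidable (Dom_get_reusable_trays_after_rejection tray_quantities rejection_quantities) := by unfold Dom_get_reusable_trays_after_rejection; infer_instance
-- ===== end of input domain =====

-- B replaces A's per-rejection re-sort-and-walk by one capped total demand, one sort and one
-- prefix cut (objective: faster; the equivalence below is about return values; neither port mutates).

-- ===== PORT A =====
-- trays[i] for an index i produced by `enumerate`: always in range, so `pyGetD _ _ 0` is exact
def pvGet (trays : List Int) (i : Int) : Int := PySem.List.pyGetD trays i 0
-- `trays[i] = v` for an in-range index i produced by `enumerate` (exact there)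
def pvSet (trays : List Int) (i : Int) (v : Int) : List Int := trays.set i.toNat v
-- sorted([i for i, qty in enumerate(trays) if qty > 0], key=lambda i: trays[i])
def pvSortedIndices (trays : List Int) : List Int :=
  PySem.List.sorted (((PySem.List.enumerate trays).filter (fun p => 0 < p.2)).map (fun p => p.1))
    (fun i => pvGet trays i)

-- A's inner `for idx in sorted_indices` loop (`break` = early return); state (trays, reusable, remaining)
def pvInnerA : List Int → List Int × List Int × Int → List Int × List Int × Int
  | [], st => st
  | idx :: rest, (trays, reus, remaining) =>
    if remaining ≤ 0 then (trays, reus, remaining)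
    else
      let consume := min (pvGet trays idx) remaining
      let trays' := pvSet trays idx (pvGet trays idx - consume)
      if pvGet trays' idx = 0 ∧ idx ∉ reus then
        pvInnerA rest (trays', reus ++ [idx], remaining - consume)
      else
        pvInnerA rest (trays', reus, remaining - consume)

def get_reusable_trays_after_rejection (tray_quantities : List Int) (rejection_quantities : List Int) : List Int × List Int :=
  let fin := rejection_quantities.foldl (fun st reject_qty =>
    let r := pvInnerA (pvSortedIndices st.1) (st.1, st.2, reject_qty)
    (r.1, r.2.1)) (tray_quantities, ([] : List Int))
  (fin.2, fin.1)

-- ===== PORT B =====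
-- B's `while k < len(order) and acc + trays[order[k]] <= total` loop: returns (order[:k], order[k:], acc)
def pvCut : List Int → List Int → Int → Int → List Int × List Int × Int
  | [], _, _, acc => ([], [], acc)
  | i :: rest, trays, total, acc =>
    if acc + pvGet trays i ≤ total then
      let r := pvCut rest trays total (acc + pvGet trays i)
      (i :: r.1, r.2.1, r.2.2)
    else ([], i :: rest, acc)

def get_reusable_trays_after_rejection_alt (tray_quantities : List Int) (rejection_quantities : List Int) : List Int × List Int :=
  let available := (tray_quantities.filter (fun q => 0 < q)).sum
  let demand := (rejection_quantities.filter (fun r => 0 < r)).sum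
  let total := min demand available
  let order := pvSortedIndices tray_quantities
  let c := pvCut order tray_quantities total 0
  let reusable := c.1
  let trays1 := reusable.foldl (fun tr i => pvSet tr i 0) tray_quantities
  let trays2 := match c.2.1 with
    | [] => trays1
    | i :: _ => pvSet trays1 i (pvGet trays1 i - (total - c.2.2))
  (reusable, trays2)

-- ===== PRECONDITION & SPEC =====
def Spec_get_reusable_trays_after_rejection (tray_quantities : List Int) (rejection_quantities : List Int) (out : List Int × List Int) : Prop := out = get_reusable_trays_after_rejection_alt tray_quantities rejection_quantities
instance (tray_quantities : List Int) (rejection_quantities : List Int) (out : List Int × List Int) : Decidable (Spec_get_reusable_trays_after_rejection tray_quantities rejection_quantities out) := by unfold Spec_get_reusable_trays_after_rejection; infer_instance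

-- ===== CLAIM (what is proved, stated in full; the proofs are below) =====
def Claim_equal_get_reusable_trays_after_rejection : Prop := ∀ (tray_quantities : List Int) (rejection_quantities : List Int), Dom_get_reusable_trays_after_rejection tray_quantities rejection_quantities → Spec_get_reusable_trays_after_rejection tray_quantities rejection_quantities (get_reusable_trays_after_rejection tray_quantities rejection_quantities)

-- ===== LEMMAS AND PROOFS =====

-- proof-side vocabulary
def posIdxFrom (s : Int) (l : List Int) : List Int :=
  ((PySem.List.enumerate l s).filter (fun p => 0 < p.2)).map (fun p => p.1)
def posIdx (l : List Int) : List Int := posIdxFrom 0 l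
def availPos (l : List Int) : Int := (l.filter (fun q => 0 < q)).sum
def pPos (x : Int) : Int := if 0 < x then x else 0
def Rlex (trays : List Int) (i j : Int) : Prop :=
  pvGet trays i < pvGet trays j ∨ (pvGet trays i = pvGet trays j ∧ i < j)
def Good (ord : List Int) (trays : List Int) : Prop :=
  ord.Perm (posIdx trays) ∧ ord.Pairwise (Rlex trays)
-- the common spec-level sweep both ports reduce to
def pvSweep : List Int → List Int × List Int × Int → List Int × List Int × Int
  | [], st => st
  | i :: rest, (trays, reus, rem) =>
    if rem ≤ 0 then (trays, reus, rem)
    else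
      let c := min (pvGet trays i) rem
      let trays' := pvSet trays i (pvGet trays i - c)
      if pvGet trays' i = 0 then pvSweep rest (trays', reus ++ [i], rem - c)
      else pvSweep rest (trays', reus, rem - c)
def ft (st : List Int × List Int × Int) : List Int × List Int := (st.1, st.2.1)
def pvInv (trays reus : List Int) : Prop := ∀ j ∈ reus, 0 ≤ j ∧ ¬ (0 < pvGet trays j)

-- basic pvGet/pvSet facts
lemma pvGet_eq_getElem (l : List Int) (i : Int) (h0 : 0 ≤ i) (h1 : i < (l.length : Int)) :
    pvGet l i = l[i.toNat]'(by omega) := by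
  simp [pvGet, PySem.List.pyGetD_eq_getElem l 0 h0 h1]

lemma pvGet_set_self (l : List Int) (i : Int) (v : Int) (h0 : 0 ≤ i) (h1 : i < (l.length : Int)) :
    pvGet (pvSet l i v) i = v := by
  have h2 : i < (((pvSet l i v).length : Nat) : Int) := by simpa [pvSet] using h1
  rw [pvGet, PySem.List.pyGetD_eq_getElem _ 0 h0 h2]
  exact List.getElem_set_self _

lemma pvGet_set_ne (l : List Int) (i j v : Int) (h0 : 0 ≤ i) (hj : 0 ≤ j) (hne : i ≠ j) :
    pvGet (pvSet l i v) j = pvGet l j := by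
  rw [pvGet, pvGet, PySem.List.pyGetD_of_nonneg _ _ hj, PySem.List.pyGetD_of_nonneg _ _ hj]
  have : i.toNat ≠ j.toNat := by omega
  simp [pvSet, List.getD_eq_getElem?_getD, List.getElem?_set_ne this]

lemma length_pvSet (l : List Int) (i v : Int) : (pvSet l i v).length = l.length := by
  simp [pvSet]

-- posIdx facts
lemma posIdxFrom_cons (s : Int) (x : Int) (l : List Int) :
    posIdxFrom s (x :: l) = (if 0 < x then [s] else []) ++ posIdxFrom (s + 1) l := by
  rw [posIdxFrom, posIdxFrom, PySem.List.enumerate_cons, List.filter_cons]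
  by_cases hx : 0 < x <;> simp [hx]

lemma mem_posIdx (trays : List Int) (i : Int) :
    i ∈ posIdx trays ↔ ∃ (k : Nat) (h : k < trays.length), i = (k : Int) ∧ 0 < trays[k] := by
  simp only [posIdx, posIdxFrom, List.mem_map, List.mem_filter]
  constructor
  · rintro ⟨p, ⟨hp, hpos⟩, rfl⟩
    rw [PySem.List.mem_enumerate_iff] at hp
    obtain ⟨k, hk, rfl⟩ := hp
    exact ⟨k, hk, by simp, by simpa using hpos⟩
  · rintro ⟨k, hk, rfl, hpos⟩
    refine ⟨((k : Int), trays[k]), ⟨?_, by simpa using hpos⟩, rfl⟩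
    rw [PySem.List.mem_enumerate_iff]
    exact ⟨k, hk, by simp⟩

lemma posIdx_valid (trays : List Int) (i : Int) (h : i ∈ posIdx trays) :
    0 ≤ i ∧ i < (trays.length : Int) ∧ 0 < pvGet trays i := by
  rw [mem_posIdx] at h
  obtain ⟨k, hk, rfl, hpos⟩ := h
  refine ⟨by omega, by omega, ?_⟩
  rw [pvGet_eq_getElem trays _ (by omega) (by omega)]
  simpa using hpos

lemma posIdx_pairwise_lt (trays : List Int) : (posIdx trays).Pairwise (· < ·) := by
  rw [posIdx, posIdxFrom]
  rw [List.pairwise_map]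
  exact (PySem.List.pairwise_lt_enumerate trays 0).filter _

lemma posIdxFrom_set_pos (l : List Int) (n : Nat) (s v : Int) (h : n < l.length)
    (hp : 0 < l[n]) (hv : 0 < v) : posIdxFrom s (l.set n v) = posIdxFrom s l := by
  induction l generalizing n s with
  | nil => simp at h
  | cons x xs ih =>
    cases n with
    | zero =>
      simp only [List.getElem_cons_zero] at hp
      simp [posIdxFrom_cons, hp, hv]
    | succ m =>
      simp only [List.getElem_cons_succ] at hp
      rw [List.set_cons_succ, posIdxFrom_cons, posIdxFrom_cons,
        ih m (s + 1) (by simpa using h) hp]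

lemma posIdxFrom_set_zero (l : List Int) (n : Nat) (s : Int) (h : n < l.length)
    (hp : 0 < l[n]) : posIdxFrom s (l.set n 0) = (posIdxFrom s l).erase (s + (n : Int)) := by
  induction l generalizing n s with
  | nil => simp at h
  | cons x xs ih =>
    cases n with
    | zero =>
      simp only [List.getElem_cons_zero] at hp
      rw [List.set_cons_zero, posIdxFrom_cons, posIdxFrom_cons]
      simp only [hp, if_pos, if_neg (by omega : ¬ (0:Int) < 0)]
      simp [List.erase_cons_head]
    | succ m =>
      simp only [List.getElem_cons_succ] at hp
      rw [List.set_cons_succ, posIdxFrom_cons, posIdxFrom_cons,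
        ih m (s + 1) (by simpa using h) hp]
      have hcast : s + 1 + (m : Int) = s + ((m + 1 : Nat) : Int) := by push_cast; ring
      split
      · rw [hcast]
        rw [List.cons_append, List.cons_append, List.nil_append, List.nil_append,
          List.erase_cons_tail (by simp; omega)]
      · simp [hcast]

lemma posIdx_pvSet_pos (trays : List Int) (i v : Int) (h0 : 0 ≤ i) (h1 : i < (trays.length : Int))
    (hp : 0 < pvGet trays i) (hv : 0 < v) : posIdx (pvSet trays i v) = posIdx trays := by
  rw [pvGet_eq_getElem trays i h0 h1] at hp
  exact posIdxFrom_set_pos trays i.toNat 0 v (by omega) hp hv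

lemma posIdx_pvSet_zero (trays : List Int) (i : Int) (h0 : 0 ≤ i) (h1 : i < (trays.length : Int))
    (hp : 0 < pvGet trays i) : posIdx (pvSet trays i 0) = (posIdx trays).erase i := by
  rw [pvGet_eq_getElem trays i h0 h1] at hp
  have := posIdxFrom_set_zero trays i.toNat 0 (by omega) hp
  rw [posIdx, pvSet, this]
  congr 1
  omega

-- availPos facts
lemma availPos_nonneg (l : List Int) : 0 ≤ availPos l := by
  apply List.sum_nonneg
  intro x hx
  have := (List.mem_filter.mp hx).2
  simp at this
  omega

lemma availPos_cons (x : Int) (l : List Int) : availPos (x :: l) = pPos x + availPos l := by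
  rw [availPos, availPos, List.filter_cons, pPos]
  by_cases hx : 0 < x <;> simp [hx]

lemma availPos_set (l : List Int) (n : Nat) (v : Int) (h : n < l.length) :
    availPos (l.set n v) = availPos l - pPos l[n] + pPos v := by
  induction l generalizing n with
  | nil => simp at h
  | cons x xs ih =>
    cases n with
    | zero =>
      rw [List.set_cons_zero, availPos_cons, availPos_cons]
      simp only [List.getElem_cons_zero]
      ring
    | succ m =>
      rw [List.set_cons_succ, availPos_cons, availPos_cons, ih m (by simpa using h)]
      simp only [List.getElem_cons_succ]
      ring

lemma availPos_pvSet (trays : List Int) (i v : Int) (h0 : 0 ≤ i) (h1 : i < (trays.length : Int)) :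
    availPos (pvSet trays i v) = availPos trays - pPos (pvGet trays i) + pPos v := by
  rw [pvSet, availPos_set trays i.toNat v (by omega), pvGet_eq_getElem trays i h0 h1]

lemma map_pvGet_posIdx (trays : List Int) :
    (posIdx trays).map (pvGet trays) = trays.filter (fun q => 0 < q) := by
  have hmm : ∀ p ∈ (PySem.List.enumerate trays 0).filter (fun p => 0 < p.2),
      pvGet trays p.1 = p.2 := by
    intro p hp
    have hmem := (List.mem_filter.mp hp).1
    rw [PySem.List.mem_enumerate_iff] at hmem
    obtain ⟨k, hk, rfl⟩ := hmem
    rw [pvGet_eq_getElem trays _ (by omega) (by simp; omega)]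
    simp
  calc (posIdx trays).map (pvGet trays)
      = ((PySem.List.enumerate trays 0).filter (fun p => 0 < p.2)).map
          (fun p => pvGet trays p.1) := by
        rw [posIdx, posIdxFrom, List.map_map]; rfl
    _ = ((PySem.List.enumerate trays 0).filter (fun p => 0 < p.2)).map (fun p => p.2) := by
        exact List.map_congr_left hmm
    _ = ((PySem.List.enumerate trays 0).map (fun p => p.2)).filter (fun q => 0 < q) := by
        rw [List.filter_map]; rfl
    _ = trays.filter (fun q => 0 < q) := by
        rw [PySem.List.map_snd_enumerate]

lemma ordSum_eq_availPos (ord trays : List Int) (hg : Good ord trays) :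
    (ord.map (pvGet trays)).sum = availPos trays := by
  rw [(hg.1.map (pvGet trays)).sum_eq, map_pvGet_posIdx]
  rfl

lemma good_valid (ord trays : List Int) (hg : Good ord trays) (i : Int) (h : i ∈ ord) :
    0 ≤ i ∧ i < (trays.length : Int) ∧ 0 < pvGet trays i :=
  posIdx_valid trays i (hg.1.mem_iff.mp h)

lemma good_nodup (ord trays : List Int) (hg : Good ord trays) : ord.Nodup := by
  have : (posIdx trays).Nodup := (posIdx_pairwise_lt trays).imp (fun h => by omega)
  exact hg.1.symm.nodup this

-- sort characterisation: stability + uniqueness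
lemma insertBy_pairwise (trays : List Int) (x : Int) (acc : List Int)
    (hp : acc.Pairwise (Rlex trays)) (hlt : ∀ a ∈ acc, a < x) :
    (PySem.List.insertBy (fun a b => decide (pvGet trays a < pvGet trays b)) x acc).Pairwise
      (Rlex trays) := by
  induction acc with
  | nil => simp [PySem.List.insertBy]
  | cons y ys ih =>
    rw [PySem.List.insertBy]
    rcases List.pairwise_cons.mp hp with ⟨hy, hys⟩
    split
    · rename_i hxy
      simp only [decide_eq_true_eq] at hxy
      refine List.pairwise_cons.mpr ⟨?_, hp⟩
      intro z hz
      rcases List.mem_cons.mp hz with rfl | hz'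
      · exact Or.inl hxy
      · rcases hy z hz' with h | ⟨h, _⟩
        · exact Or.inl (lt_trans hxy h)
        · exact Or.inl (by omega)
    · rename_i hxy
      simp only [decide_eq_true_eq, not_lt] at hxy
      refine List.pairwise_cons.mpr ⟨?_, ih hys (fun a ha => hlt a (List.mem_cons_of_mem _ ha))⟩
      intro z hz
      rcases (PySem.List.mem_insertBy _ _ _ _).mp hz with rfl | hz'
      · rcases lt_or_eq_of_le hxy with h | h
        · exact Or.inl h
        · exact Or.inr ⟨h, hlt y (List.mem_cons_self)⟩
      · exact hy z hz'

lemma foldl_insertBy_pairwise (trays : List Int) :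
    ∀ (l acc : List Int), acc.Pairwise (Rlex trays) → (∀ a ∈ acc, ∀ b ∈ l, a < b) →
      l.Pairwise (· < ·) →
      (l.foldl (fun acc x =>
        PySem.List.insertBy (fun a b => decide (pvGet trays a < pvGet trays b)) x acc)
        acc).Pairwise (Rlex trays) := by
  intro l
  induction l with
  | nil => intro acc h _ _; simpa using h
  | cons x xs ih =>
    intro acc hacc hcross hl
    rcases List.pairwise_cons.mp hl with ⟨hx, hxs⟩
    rw [List.foldl_cons]
    apply ih
    · exact insertBy_pairwise trays x acc hacc
        (fun a ha => hcross a ha x (List.mem_cons_self))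
    · intro a ha b hb
      rcases (PySem.List.mem_insertBy _ _ _ _).mp ha with rfl | ha'
      · exact hx b hb
      · exact hcross a ha' b (List.mem_cons_of_mem _ hb)
    · exact hxs

lemma sortedIndices_good (trays : List Int) : Good (pvSortedIndices trays) trays := by
  constructor
  · exact PySem.List.sorted_perm _ _ _
  · rw [pvSortedIndices, PySem.List.sorted_eq_foldl_insertBy]
    exact foldl_insertBy_pairwise trays _ [] (by simp) (by simp) (posIdx_pairwise_lt trays)

lemma good_unique (ord trays : List Int) (hg : Good ord trays) : pvSortedIndices trays = ord := by
  have hperm : (pvSortedIndices trays).Perm ord :=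
    (sortedIndices_good trays).1.trans hg.1.symm
  apply List.Perm.eq_of_pairwise _ (sortedIndices_good trays).2 hg.2 hperm
  intro a b _ _ hab hba
  rcases hab with h | ⟨h, h2⟩ <;> rcases hba with h' | ⟨h', h2'⟩ <;> omega

-- Good preservation
lemma good_tail_set_zero (i : Int) (rest trays : List Int) (hg : Good (i :: rest) trays) :
    Good rest (pvSet trays i 0) := by
  obtain ⟨hv0, hv1, hv2⟩ := good_valid _ _ hg i List.mem_cons_self
  rcases List.pairwise_cons.mp hg.2 with ⟨hi, hrest⟩
  have hnotmem : i ∉ rest := by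
    intro hmem
    rcases hi i hmem with h | ⟨_, h⟩ <;> omega
  constructor
  · rw [posIdx_pvSet_zero trays i hv0 hv1 hv2]
    have := hg.1.erase i
    rwa [List.erase_cons_head] at this
  · apply hrest.imp_of_mem
    intro a b ha hb hab
    have hva := good_valid _ _ hg a (List.mem_cons_of_mem _ ha)
    have hvb := good_valid _ _ hg b (List.mem_cons_of_mem _ hb)
    have hia : i ≠ a := fun h => hnotmem (h ▸ ha)
    have hib : i ≠ b := fun h => hnotmem (h ▸ hb)
    rw [Rlex, pvGet_set_ne trays i a 0 hv0 hva.1 hia, pvGet_set_ne trays i b 0 hv0 hvb.1 hib]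
    exact hab

lemma good_set_partial (i : Int) (rest trays : List Int) (hg : Good (i :: rest) trays)
    (v : Int) (hv : 0 < v) (hlt : v < pvGet trays i) :
    Good (i :: rest) (pvSet trays i v) := by
  obtain ⟨hv0, hv1, hv2⟩ := good_valid _ _ hg i List.mem_cons_self
  rcases List.pairwise_cons.mp hg.2 with ⟨hi, hrest⟩
  have hnotmem : i ∉ rest := by
    intro hmem
    rcases hi i hmem with h | ⟨_, h⟩ <;> omega
  constructor
  · rw [posIdx_pvSet_pos trays i v hv0 hv1 hv2 hv]
    exact hg.1
  · refine List.pairwise_cons.mpr ⟨?_, ?_⟩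
    · intro b hb
      have hvb := good_valid _ _ hg b (List.mem_cons_of_mem _ hb)
      have hib : i ≠ b := fun h => hnotmem (h ▸ hb)
      rw [Rlex, pvGet_set_self trays i v hv0 hv1, pvGet_set_ne trays i b v hv0 hvb.1 hib]
      rcases hi b hb with h | ⟨h, _⟩
      · exact Or.inl (by omega)
      · exact Or.inl (by omega)
    · apply hrest.imp_of_mem
      intro a b ha hb hab
      have hva := good_valid _ _ hg a (List.mem_cons_of_mem _ ha)
      have hvb := good_valid _ _ hg b (List.mem_cons_of_mem _ hb)
      have hia : i ≠ a := fun h => hnotmem (h ▸ ha)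
      have hib : i ≠ b := fun h => hnotmem (h ▸ hb)
      rw [Rlex, pvGet_set_ne trays i a v hv0 hva.1 hia, pvGet_set_ne trays i b v hv0 hvb.1 hib]
      exact hab

-- A's inner loop is the spec sweep when the order avoids reusable and repeats itself
lemma innerA_eq_sweep (ord : List Int) (trays reus : List Int) (rem : Int)
    (hd : ∀ i ∈ ord, i ∉ reus) (hnd : ord.Nodup) :
    pvInnerA ord (trays, reus, rem) = pvSweep ord (trays, reus, rem) := by
  induction ord generalizing trays reus rem with
  | nil => rfl
  | cons idx rest ih =>
    rw [pvInnerA, pvSweep]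
    by_cases hrem : rem ≤ 0
    · simp [hrem]
    · simp only [if_neg hrem]
      rcases List.nodup_cons.mp hnd with ⟨hni, hndr⟩
      have hd' : ∀ i ∈ rest, i ∉ reus := fun i hi => hd i (List.mem_cons_of_mem _ hi)
      by_cases hz : pvGet (pvSet trays idx (pvGet trays idx - min (pvGet trays idx) rem)) idx = 0
      · rw [if_pos ⟨hz, hd idx List.mem_cons_self⟩, if_pos hz]
        apply ih
        · intro i hi
          simp only [List.mem_append, List.mem_singleton]
          rintro (h | rfl)
          · exact hd' i hi h
          · exact hni hi
        · exact hndr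
      · rw [if_neg (by tauto), if_neg hz]
        exact ih _ _ _ hd' hndr

-- sweeping a non-positive budget does nothing
lemma sweep_nonpos (ord trays reus : List Int) (rem : Int) (h : rem ≤ 0) :
    pvSweep ord (trays, reus, rem) = (trays, reus, rem) := by
  cases ord with
  | nil => rfl
  | cons i rest => rw [pvSweep, if_pos h]

lemma sweep_max_fst (ord trays reus : List Int) (rem : Int) :
    (pvSweep ord (trays, reus, rem)).1 = (pvSweep ord (trays, reus, max rem 0)).1 := by
  by_cases h : rem ≤ 0
  · rw [sweep_nonpos ord trays reus rem h,
      sweep_nonpos ord trays reus (max rem 0) (by omega)]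
  · rw [max_eq_left (by omega : 0 ≤ rem)]

lemma sweep_max_snd (ord trays reus : List Int) (rem : Int) :
    (pvSweep ord (trays, reus, rem)).2.1 = (pvSweep ord (trays, reus, max rem 0)).2.1 := by
  by_cases h : rem ≤ 0
  · rw [sweep_nonpos ord trays reus rem h,
      sweep_nonpos ord trays reus (max rem 0) (by omega)]
  · rw [max_eq_left (by omega : 0 ≤ rem)]

-- pvInv preservation through a sweep
lemma inv_sweep (ord : List Int) (trays reus : List Int) (rem : Int)
    (hI : pvInv trays reus) (hv : ∀ i ∈ ord, 0 ≤ i ∧ i < (trays.length : Int) ∧ 0 < pvGet trays i)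
    (hd : ∀ i ∈ ord, i ∉ reus) (hnd : ord.Nodup) :
    pvInv (pvSweep ord (trays, reus, rem)).1 (pvSweep ord (trays, reus, rem)).2.1 := by
  induction ord generalizing trays reus rem with
  | nil => exact hI
  | cons i rest ih =>
    rw [pvSweep]
    by_cases hrem : rem ≤ 0
    · simpa [hrem] using hI
    · simp only [if_neg hrem]
      obtain ⟨h0, h1, h2⟩ := hv i List.mem_cons_self
      rcases List.nodup_cons.mp hnd with ⟨hni, hndr⟩
      set c := min (pvGet trays i) rem with hc
      set trays' := pvSet trays i (pvGet trays i - c) with htr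
      have hv' : ∀ j ∈ rest, 0 ≤ j ∧ j < (trays'.length : Int) ∧ 0 < pvGet trays' j := by
        intro j hj
        obtain ⟨j0, j1, j2⟩ := hv j (List.mem_cons_of_mem _ hj)
        have hij : i ≠ j := fun h => hni (h ▸ hj)
        rw [htr, pvGet_set_ne trays i j _ h0 j0 hij, length_pvSet]
        exact ⟨j0, j1, j2⟩
      have hunch : ∀ j ∈ reus, pvGet trays' j = pvGet trays j := by
        intro j hj
        have hij : i ≠ j := fun h => hd i List.mem_cons_self (h ▸ hj)
        exact pvGet_set_ne trays i j _ h0 (hI j hj).1 hij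
      split
      · rename_i hz
        apply ih
        · intro j hj
          rcases List.mem_append.mp hj with hj' | hj'
          · exact ⟨(hI j hj').1, by rw [hunch j hj']; exact (hI j hj').2⟩
          · rw [List.mem_singleton] at hj'
            subst hj'
            exact ⟨h0, by rw [hz]; omega⟩
        · exact hv'
        · intro j hj hmem
          rcases List.mem_append.mp hmem with h | h
          · exact hd j (List.mem_cons_of_mem _ hj) h
          · rw [List.mem_singleton] at h
            exact hni (h ▸ hj)
        · exact hndr
      · apply ih
        · intro j hj
          exact ⟨(hI j hj).1, by rw [hunch j hj]; exact (hI j hj).2⟩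
        · exact hv'
        · exact fun j hj => hd j (List.mem_cons_of_mem _ hj)
        · exact hndr

-- how much stock survives a sweep
lemma availPos_sweep (ord : List Int) (trays reus : List Int) (t : Int)
    (hg : Good ord trays) (ht : 0 ≤ t) :
    availPos (pvSweep ord (trays, reus, t)).1 = availPos trays - min t (availPos trays) := by
  induction ord generalizing trays reus t with
  | nil =>
    have hA : availPos trays = 0 := by
      have := ordSum_eq_availPos [] trays hg
      simpa using this.symm
    show availPos trays = availPos trays - min t (availPos trays)
    omega
  | cons i rest ih =>
    obtain ⟨h0, h1, h2⟩ := good_valid _ _ hg i List.mem_cons_self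
    have hA : pvGet trays i + ((rest.map (pvGet trays)).sum) = availPos trays := by
      have := ordSum_eq_availPos _ trays hg
      simpa using this
    have hSr : 0 ≤ (rest.map (pvGet trays)).sum := by
      apply List.sum_nonneg
      intro x hx
      rcases List.mem_map.mp hx with ⟨j, hj, rfl⟩
      have := good_valid _ _ hg j (List.mem_cons_of_mem _ hj)
      omega
    rw [pvSweep]
    by_cases hrem : t ≤ 0
    · rw [if_pos hrem]
      show availPos trays = availPos trays - min t (availPos trays)
      omega
    · rw [if_neg hrem]
      by_cases hqt : pvGet trays i ≤ t
      · rw [min_eq_left hqt]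
        have hz : pvGet (pvSet trays i (pvGet trays i - pvGet trays i)) i = 0 := by
          rw [pvGet_set_self trays i _ h0 h1]; omega
        rw [if_pos hz]
        have hg' : Good rest (pvSet trays i (pvGet trays i - pvGet trays i)) := by
          have : pvGet trays i - pvGet trays i = 0 := by omega
          rw [this]
          exact good_tail_set_zero i rest trays hg
        rw [ih _ _ _ hg' (by omega)]
        have hav : availPos (pvSet trays i (pvGet trays i - pvGet trays i)) =
            availPos trays - pvGet trays i := by
          rw [availPos_pvSet trays i _ h0 h1, pPos, pPos]
          rw [if_pos h2, if_neg (by omega)]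
          ring
        rw [hav]
        omega
      · rw [min_eq_right (by omega)]
        have hnz : ¬ pvGet (pvSet trays i (pvGet trays i - t)) i = 0 := by
          rw [pvGet_set_self trays i _ h0 h1]; omega
        rw [if_neg hnz, sweep_nonpos _ _ _ _ (by omega)]
        have hav : availPos (pvSet trays i (pvGet trays i - t)) = availPos trays - t := by
          rw [availPos_pvSet trays i _ h0 h1, pPos, pPos]
          rw [if_pos h2, if_pos (by omega)]
          ring
        rw [hav]
        omega

-- the sweep only sees the budget capped at the available stock
lemma sweep_cap (ord : List Int) (trays reus : List Int) (t : Int)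
    (hg : Good ord trays) (ht : 0 ≤ t) :
    ft (pvSweep ord (trays, reus, t)) = ft (pvSweep ord (trays, reus, min t (availPos trays))) := by
  induction ord generalizing trays reus t with
  | nil => rfl
  | cons i rest ih =>
    by_cases hcap : t ≤ availPos trays
    · rw [min_eq_left hcap]
    · obtain ⟨h0, h1, h2⟩ := good_valid _ _ hg i List.mem_cons_self
      have hA : pvGet trays i + ((rest.map (pvGet trays)).sum) = availPos trays := by
        have := ordSum_eq_availPos _ trays hg
        simpa using this
      have hSr : 0 ≤ (rest.map (pvGet trays)).sum := by
        apply List.sum_nonneg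
        intro x hx
        rcases List.mem_map.mp hx with ⟨j, hj, rfl⟩
        have := good_valid _ _ hg j (List.mem_cons_of_mem _ hj)
        omega
      rw [min_eq_right (by omega)]
      have hz : pvGet (pvSet trays i (pvGet trays i - pvGet trays i)) i = 0 := by
        rw [pvGet_set_self trays i _ h0 h1]; omega
      have hg' : Good rest (pvSet trays i (pvGet trays i - pvGet trays i)) := by
        have he : pvGet trays i - pvGet trays i = 0 := by omega
        rw [he]
        exact good_tail_set_zero i rest trays hg
      have hav : availPos (pvSet trays i (pvGet trays i - pvGet trays i)) =
          availPos trays - pvGet trays i := by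
        rw [availPos_pvSet trays i _ h0 h1, pPos, pPos]
        rw [if_pos h2, if_neg (by omega)]
        ring
      conv_lhs => rw [pvSweep, if_neg (show ¬ t ≤ 0 by omega),
        min_eq_left (show pvGet trays i ≤ t by omega), if_pos hz]
      conv_rhs => rw [pvSweep, if_neg (show ¬ availPos trays ≤ 0 by omega),
        min_eq_left (show pvGet trays i ≤ availPos trays by omega), if_pos hz]
      rw [ih _ _ (t - pvGet trays i) hg' (by omega)]
      rw [ih _ _ (availPos trays - pvGet trays i) hg' (by omega)]
      rw [hav, min_eq_right (by omega), min_self]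

-- composition: sweeping t1 then (after a re-sort) t2 = sweeping t1 + t2
lemma sweep_comp (ord : List Int) (trays reus : List Int) (t1 t2 : Int)
    (hg : Good ord trays) (h1 : 0 ≤ t1) (h2 : 0 ≤ t2) :
    ft (pvSweep (pvSortedIndices (pvSweep ord (trays, reus, t1)).1)
        ((pvSweep ord (trays, reus, t1)).1, (pvSweep ord (trays, reus, t1)).2.1, t2))
      = ft (pvSweep ord (trays, reus, t1 + t2)) := by
  induction ord generalizing trays reus t1 t2 with
  | nil =>
    have hpos : posIdx trays = [] := by
      have := hg.1
      exact this.nil_eq.symm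
    have hsort : pvSortedIndices trays = [] :=
      good_unique [] trays ⟨by rw [hpos], by simp⟩
    rw [pvSweep]
    simp only
    rw [hsort]
    rfl
  | cons i rest ih =>
    obtain ⟨hv0, hv1, hv2⟩ := good_valid _ _ hg i List.mem_cons_self
    by_cases ht1 : t1 ≤ 0
    · have ht1' : t1 = 0 := by omega
      subst ht1'
      rw [sweep_nonpos (i :: rest) trays reus 0 (le_refl 0)]
      show ft (pvSweep (pvSortedIndices trays) (trays, reus, t2))
        = ft (pvSweep (i :: rest) (trays, reus, 0 + t2))
      rw [good_unique _ _ hg, show (0 : Int) + t2 = t2 from by omega]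
    · rw [pvSweep, if_neg ht1]
      by_cases hqt : pvGet trays i ≤ t1
      · -- tray i is zeroed in the first sweep, and also in the combined sweep
        rw [min_eq_left hqt]
        have hz : pvGet (pvSet trays i (pvGet trays i - pvGet trays i)) i = 0 := by
          rw [pvGet_set_self trays i _ hv0 hv1]; omega
        rw [if_pos hz]
        have hg' : Good rest (pvSet trays i (pvGet trays i - pvGet trays i)) := by
          have : pvGet trays i - pvGet trays i = 0 := by omega
          rw [this]
          exact good_tail_set_zero i rest trays hg
        rw [ih _ _ _ _ hg' (by omega) h2]
        conv_rhs => rw [pvSweep, if_neg (show ¬ t1 + t2 ≤ 0 by omega),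
          min_eq_left (show pvGet trays i ≤ t1 + t2 by omega), if_pos hz]
        rw [show t1 - pvGet trays i + t2 = t1 + t2 - pvGet trays i from by omega]
      · -- tray i is only partially consumed by the first sweep
        rw [min_eq_right (by omega)]
        have hq' : pvGet (pvSet trays i (pvGet trays i - t1)) i = pvGet trays i - t1 :=
          pvGet_set_self trays i _ hv0 hv1
        have hnz : ¬ pvGet (pvSet trays i (pvGet trays i - t1)) i = 0 := by
          rw [hq']; omega
        rw [if_neg hnz,
          sweep_nonpos rest (pvSet trays i (pvGet trays i - t1)) reus (t1 - t1) (by omega)]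
        show ft (pvSweep (pvSortedIndices (pvSet trays i (pvGet trays i - t1)))
            (pvSet trays i (pvGet trays i - t1), reus, t2))
          = ft (pvSweep (i :: rest) (trays, reus, t1 + t2))
        have hg1 : Good (i :: rest) (pvSet trays i (pvGet trays i - t1)) :=
          good_set_partial i rest trays hg _ (by omega) (by omega)
        rw [good_unique _ _ hg1]
        by_cases ht2 : t2 ≤ 0
        · have ht2' : t2 = 0 := by omega
          subst ht2'
          rw [sweep_nonpos _ _ _ _ (by omega)]
          conv_rhs => rw [pvSweep, if_neg (show ¬ t1 + 0 ≤ 0 by omega),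
            min_eq_right (show t1 + 0 ≤ pvGet trays i by omega),
            if_neg (show ¬ pvGet (pvSet trays i (pvGet trays i - (t1 + 0))) i = 0 by
              rw [pvGet_set_self trays i _ hv0 hv1]; omega),
            sweep_nonpos _ _ _ _ (by omega)]
          rw [ft, ft]
          norm_num
        · rw [pvSweep, if_neg ht2]
          rw [hq']
          by_cases hq2 : pvGet trays i - t1 ≤ t2
          · rw [min_eq_left hq2]
            have hset2 : pvSet (pvSet trays i (pvGet trays i - t1)) i
                (pvGet trays i - t1 - (pvGet trays i - t1)) = pvSet trays i 0 := by
              rw [pvSet, pvSet, pvSet, List.set_set]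
              congr 1
              omega
            have hz2 : pvGet (pvSet (pvSet trays i (pvGet trays i - t1)) i
                (pvGet trays i - t1 - (pvGet trays i - t1))) i = 0 := by
              rw [hset2, pvGet_set_self trays i _ hv0 hv1]
            rw [if_pos hz2, hset2]
            conv_rhs => rw [pvSweep, if_neg (show ¬ t1 + t2 ≤ 0 by omega),
              min_eq_left (show pvGet trays i ≤ t1 + t2 by omega),
              if_pos (show pvGet (pvSet trays i (pvGet trays i - pvGet trays i)) i = 0 by
                rw [pvGet_set_self trays i _ hv0 hv1]; omega)]
            rw [show pvGet trays i - pvGet trays i = (0 : Int) from by omega]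
            rw [show t1 + t2 - pvGet trays i = t2 - (pvGet trays i - t1) from by omega]
          · rw [min_eq_right (by omega)]
            have hnz2 : ¬ pvGet (pvSet (pvSet trays i (pvGet trays i - t1)) i
                (pvGet trays i - t1 - t2)) i = 0 := by
              rw [pvGet_set_self _ i _ hv0 (by rw [length_pvSet]; exact hv1)]
              omega
            rw [if_neg hnz2, sweep_nonpos _ _ _ _ (by omega)]
            conv_rhs => rw [pvSweep, if_neg (show ¬ t1 + t2 ≤ 0 by omega),
              min_eq_right (show t1 + t2 ≤ pvGet trays i by omega),
              if_neg (show ¬ pvGet (pvSet trays i (pvGet trays i - (t1 + t2))) i = 0 by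
                rw [pvGet_set_self trays i _ hv0 hv1]; omega),
              sweep_nonpos _ _ _ _ (by omega)]
            have hset : pvSet (pvSet trays i (pvGet trays i - t1)) i
                (pvGet trays i - t1 - t2) = pvSet trays i (pvGet trays i - (t1 + t2)) := by
              rw [pvSet, pvSet, pvSet, List.set_set]
              congr 1
              omega
            rw [ft, ft, hset]

-- A's whole fold collapses to one capped sweep
lemma foldA_eq_sweep (rq : List Int) (trays reus : List Int) (hI : pvInv trays reus) :
    rq.foldl (fun st reject_qty =>
      let r := pvInnerA (pvSortedIndices st.1) (st.1, st.2, reject_qty)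
      (r.1, r.2.1)) (trays, reus)
    = ft (pvSweep (pvSortedIndices trays)
        (trays, reus, min ((rq.filter (fun r => 0 < r)).sum) (availPos trays))) := by
  induction rq generalizing trays reus with
  | nil =>
    rw [List.foldl_nil, List.filter_nil]
    have : min (List.sum ([] : List Int)) (availPos trays) = 0 := by
      have := availPos_nonneg trays
      simp
      omega
    rw [this, sweep_nonpos _ _ _ _ (by omega)]
    rfl
  | cons r rest ih =>
    have hG := sortedIndices_good trays
    have hd : ∀ i ∈ pvSortedIndices trays, i ∉ reus := by
      intro i hi hmem
      have := (good_valid _ _ hG i hi).2.2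
      exact (hI i hmem).2 this
    have hnd := good_nodup _ _ hG
    have hv : ∀ i ∈ pvSortedIndices trays,
        0 ≤ i ∧ i < (trays.length : Int) ∧ 0 < pvGet trays i :=
      fun i hi => good_valid _ _ hG i hi
    rw [List.foldl_cons]
    simp only
    rw [innerA_eq_sweep _ _ _ _ hd hnd]
    rw [sweep_max_fst (pvSortedIndices trays) trays reus r,
      sweep_max_snd (pvSortedIndices trays) trays reus r]
    set t1 := max r 0 with ht1
    set st1 := pvSweep (pvSortedIndices trays) (trays, reus, t1) with hst1
    rw [ih st1.1 st1.2.1 (inv_sweep _ _ _ _ hI hv hd hnd)]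
    have hcomp := sweep_comp (pvSortedIndices trays) trays reus t1
      (min ((rest.filter (fun r => 0 < r)).sum) (availPos st1.1)) hG (by omega)
      (by
        have h1 : 0 ≤ (rest.filter (fun r => 0 < r)).sum := by
          apply List.sum_nonneg
          intro x hx
          have := (List.mem_filter.mp hx).2
          simp at this
          omega
        have h2 := availPos_nonneg st1.1
        omega)
    rw [← hst1] at hcomp
    rw [hcomp]
    have hav := availPos_sweep (pvSortedIndices trays) trays reus t1 hG (by omega)
    rw [← hst1] at hav
    have hsum : ((r :: rest).filter (fun r => 0 < r)).sum =
        t1 + (rest.filter (fun r => 0 < r)).sum := by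
      rw [List.filter_cons]
      by_cases h : 0 < r
      · simp [h, ht1]
        omega
      · simp [h, ht1]
        omega
    have hP : 0 ≤ (rest.filter (fun r => 0 < r)).sum := by
      apply List.sum_nonneg
      intro x hx
      have := (List.mem_filter.mp hx).2
      simp at this
      omega
    have hA := availPos_nonneg trays
    have hA1 := availPos_nonneg st1.1
    rw [sweep_cap _ _ _ _ hG (by omega), hsum]
    rw [show min (t1 + min ((rest.filter (fun r => 0 < r)).sum) (availPos st1.1))
        (availPos trays) = min (t1 + (rest.filter (fun r => 0 < r)).sum) (availPos trays)
      from by omega]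

-- B's cut computes the same sweep
lemma cut_eq_sweep (ord : List Int) (trays0 trays reus : List Int) (t acc : Int)
    (h1 : ∀ j ∈ ord, pvGet trays j = pvGet trays0 j)
    (hv : ∀ j ∈ ord, 0 ≤ j ∧ j < (trays.length : Int) ∧ 0 < pvGet trays j)
    (hnd : ord.Nodup) (hacc : acc ≤ t) :
    ft (pvSweep ord (trays, reus, t - acc)) =
      ((match (pvCut ord trays0 t acc).2.1 with
        | [] => (pvCut ord trays0 t acc).1.foldl (fun tr i => pvSet tr i 0) trays
        | i :: _ => pvSet ((pvCut ord trays0 t acc).1.foldl (fun tr i => pvSet tr i 0) trays) i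
            (pvGet ((pvCut ord trays0 t acc).1.foldl (fun tr i => pvSet tr i 0) trays) i
              - (t - (pvCut ord trays0 t acc).2.2))),
       reus ++ (pvCut ord trays0 t acc).1) := by
  induction ord generalizing trays reus acc with
  | nil =>
    rw [pvCut]
    simp [pvSweep, ft]
  | cons i rest ih =>
    obtain ⟨h0, hlen, hq⟩ := hv i List.mem_cons_self
    have hqi : pvGet trays i = pvGet trays0 i := h1 i List.mem_cons_self
    rcases List.nodup_cons.mp hnd with ⟨hni, hndr⟩
    rw [pvCut]
    by_cases hle : acc + pvGet trays0 i ≤ t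
    · rw [if_pos hle]
      have hrem : 0 < t - acc := by omega
      rw [pvSweep, if_neg (by omega)]
      have hmin : min (pvGet trays i) (t - acc) = pvGet trays i := by omega
      rw [hmin]
      have hz : pvGet (pvSet trays i (pvGet trays i - pvGet trays i)) i = 0 := by
        rw [pvGet_set_self trays i _ h0 hlen]; omega
      rw [if_pos hz]
      have e0 : pvSet trays i (pvGet trays i - pvGet trays i) = pvSet trays i 0 := by
        congr 1; omega
      have e1 : t - acc - pvGet trays i = t - (acc + pvGet trays0 i) := by omega
      rw [e0, e1]
      have htl : ∀ j ∈ rest, pvGet (pvSet trays i 0) j = pvGet trays0 j := by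
        intro j hj
        obtain ⟨j0, _, _⟩ := hv j (List.mem_cons_of_mem _ hj)
        have hij : i ≠ j := fun h => hni (h ▸ hj)
        rw [pvGet_set_ne trays i j 0 h0 j0 hij]
        exact h1 j (List.mem_cons_of_mem _ hj)
      have htv : ∀ j ∈ rest, 0 ≤ j ∧ j < ((pvSet trays i 0).length : Int) ∧
          0 < pvGet (pvSet trays i 0) j := by
        intro j hj
        obtain ⟨j0, j1, j2⟩ := hv j (List.mem_cons_of_mem _ hj)
        have hij : i ≠ j := fun h => hni (h ▸ hj)
        rw [pvGet_set_ne trays i j 0 h0 j0 hij, length_pvSet]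
        exact ⟨j0, j1, j2⟩
      rw [ih (pvSet trays i 0) (reus ++ [i]) (acc + pvGet trays0 i) htl htv hndr (by omega)]
      simp only [List.foldl_cons, List.append_assoc, List.singleton_append]
    · rw [if_neg hle]
      simp only
      have hrem : t - acc < pvGet trays i := by omega
      by_cases hr0 : t - acc ≤ 0
      · have hacc0 : t - acc = 0 := by omega
        rw [sweep_nonpos _ _ _ _ hr0]
        rw [List.foldl_nil]
        have : pvSet trays i (pvGet trays i - (t - acc)) = trays := by
          rw [hacc0]
          rw [pvGet_eq_getElem trays i h0 hlen]
          simp [pvSet]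
        rw [ft]
        simp only
        rw [this]
        simp
      · rw [pvSweep, if_neg hr0]
        have hmin : min (pvGet trays i) (t - acc) = t - acc := by omega
        rw [hmin]
        have hnz : ¬ pvGet (pvSet trays i (pvGet trays i - (t - acc))) i = 0 := by
          rw [pvGet_set_self trays i _ h0 hlen]; omega
        rw [if_neg hnz, sweep_nonpos _ _ _ _ (by omega)]
        rw [ft]
        simp

-- ===== VERDICT (by name: the statement is the Claim_ definition above) =====
theorem get_reusable_trays_after_rejection_spec : Claim_equal_get_reusable_trays_after_rejection := by
  intro tq rq _
  rw [Spec_get_reusable_trays_after_rejection]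
  rw [get_reusable_trays_after_rejection, get_reusable_trays_after_rejection_alt]
  simp only
  have hG := sortedIndices_good tq
  have hI : pvInv tq [] := by intro j hj; simp at hj
  rw [foldA_eq_sweep rq tq [] hI]
  set t := min ((rq.filter (fun r => 0 < r)).sum) ((tq.filter (fun q => 0 < q)).sum) with htdef
  have ht0 : 0 ≤ t := by
    have h1 : 0 ≤ (rq.filter (fun r => 0 < r)).sum := by
      apply List.sum_nonneg
      intro x hx
      have := (List.mem_filter.mp hx).2
      simp at this
      omega
    have h2 := availPos_nonneg tq
    rw [htdef, availPos] at *
    omega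
  have hcut := cut_eq_sweep (pvSortedIndices tq) tq tq [] t 0
    (fun j _ => rfl)
    (fun j hj => good_valid _ _ hG j hj)
    (good_nodup _ _ hG)
    ht0
  rw [show t - 0 = t from by omega] at hcut
  rw [show min ((rq.filter (fun r => 0 < r)).sum) (availPos tq) = t from rfl]
  rw [hcut]
  simp
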